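-- pv_equiv track=rewrite | github.com/TedCha/open-kattis-problems | python/fromatob.py | transform
-- ===== SOURCE A (Python) =====
-- def transform(a, b):
--     if a == b:
--         return 0
--
--     if b > a:
--         return b - a
--
--     if (a % 2) == 1:
--         return 1 + transform(a + 1, b)
--
--     else:
--         return 1 + transform(a//2, b)
-- ===== SOURCE B (Python) =====
-- def transform(a, b):
--     # Ceil-halving loop: an odd a costs 2 ops (increment + halve) folded into
--     # a single step a -> (a+1)//2; an even a costs 1. Finish with b - a.
--     count = 0
--     while a > b:
--         count += 1 + a % 2
--         a = (a + 1) // 2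
--     return count + (b - a)
-- ===== Notes on version B (the rewrite author's own statement) =====
-- stated objective: alternative
-- what changed: Recursion replaced by a branch-free ceil-halving loop: the odd case's two operations (increment, then the forced halve) are fused into one step a -> (a+1)//2 costing 1 + a%2, so the loop does one halving per iteration instead of following A's step-by-step recurrence.
import Mathlib
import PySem

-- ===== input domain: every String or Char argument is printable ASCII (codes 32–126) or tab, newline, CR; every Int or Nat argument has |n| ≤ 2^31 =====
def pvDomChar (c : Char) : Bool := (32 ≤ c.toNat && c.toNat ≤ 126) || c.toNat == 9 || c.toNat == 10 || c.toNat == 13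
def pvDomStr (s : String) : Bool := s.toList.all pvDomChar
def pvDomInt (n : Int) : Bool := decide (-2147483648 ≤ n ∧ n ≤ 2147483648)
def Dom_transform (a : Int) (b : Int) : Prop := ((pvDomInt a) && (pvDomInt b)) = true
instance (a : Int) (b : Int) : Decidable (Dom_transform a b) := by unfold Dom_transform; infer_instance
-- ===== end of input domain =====

-- B fuses A's odd step (increment, then the forced halve) into one ceil-halving step a -> (a+1)//2
-- costing 1 + a%2, run as a branch-free loop; objective: alternative (same result, different recurrence).
-- Both ports carry a fuel parameter only to be total; the fuels (200 / 100) exceed the ≤ ~63 / ~32 steps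
-- any input in Dom ∩ Pre needs.

-- ===== PORT A =====
def transformFuel : Nat → Int → Int → Int
  | 0, _, _ => 0
  | n+1, a, b =>
    if a = b then 0
    else if b > a then b - a
    else if PySem.Int.mod a 2 = 1 then 1 + transformFuel n (a + 1) b
    else 1 + transformFuel n (PySem.Int.floordiv a 2) b

def transform (a : Int) (b : Int) : Int := transformFuel 200 a b

-- ===== PORT B =====
def transformCeilLoop : Nat → Int → Int → Int → Int
  | 0, count, _, _ => count
  | n+1, count, a, b =>
    if a > b then
      transformCeilLoop n (count + (1 + PySem.Int.mod a 2)) (PySem.Int.floordiv (a + 1) 2) b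
    else count + (b - a)

def transform_alt (a : Int) (b : Int) : Int := transformCeilLoop 100 0 a b

-- ===== PRECONDITION & SPEC =====
-- Pre_ excludes exactly a > b with b ≤ 0: there A's recursion never reaches its base cases (RecursionError).
def Pre_transform (a : Int) (b : Int) : Prop := a ≤ b ∨ 1 ≤ b
instance (a : Int) (b : Int) : Decidable (Pre_transform a b) := by unfold Pre_transform; infer_instance
def pvWitness_transform : Int × Int := (100, 3)

def Spec_transform (a : Int) (b : Int) (out : Int) : Prop := out = transform_alt a b
instance (a : Int) (b : Int) (out : Int) : Decidable (Spec_transform a b out) := by unfold Spec_transform; infer_instance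

-- ===== CLAIM (what is proved, stated in full; the proofs are below) =====
def Claim_equal_transform : Prop := ∀ (a : Int) (b : Int), Dom_transform a b → Pre_transform a b → Spec_transform a b (transform a b)

-- ===== LEMMAS AND PROOFS =====

-- When a ≤ b both programs stop at once (any positive fuels).
theorem base_eq (count a b : Int) (n m : Nat) (h : a ≤ b) :
    transformCeilLoop (n+1) count a b = count + transformFuel (m+1) a b := by
  have h1 : ¬ a > b := by omega
  by_cases hab : a = b
  · simp [transformCeilLoop, transformFuel, hab]
  · have h2 : b > a := by omega
    simp [transformCeilLoop, transformFuel, hab, h1, h2]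

-- Main invariant: one ceil-halving step of B matches one (even a) or two (odd a) steps of A.
theorem ceil_eq (k : Nat) : ∀ (a b count : Int) (n m : Nat),
    1 ≤ b → a ≤ b * 2 ^ k → k + 1 ≤ n → 2 * k + 1 ≤ m →
    transformCeilLoop n count a b = count + transformFuel m a b := by
  induction k with
  | zero =>
    intro a b count n m hb hle hn hm
    obtain ⟨n', rfl⟩ : ∃ n', n = n' + 1 := ⟨n - 1, by omega⟩
    obtain ⟨m', rfl⟩ : ∃ m', m = m' + 1 := ⟨m - 1, by omega⟩
    exact base_eq count a b n' m' (by simpa using hle)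
  | succ k ih =>
    intro a b count n m hb hle hn hm
    by_cases hab : a ≤ b
    · obtain ⟨n', rfl⟩ : ∃ n', n = n' + 1 := ⟨n - 1, by omega⟩
      obtain ⟨m', rfl⟩ : ∃ m', m = m' + 1 := ⟨m - 1, by omega⟩
      exact base_eq count a b n' m' hab
    · have hgt : a > b := by omega
      obtain ⟨n', rfl⟩ : ∃ n', n = n' + 1 := ⟨n - 1, by omega⟩
      obtain ⟨m', rfl⟩ : ∃ m', m = m' + 2 := ⟨m - 2, by omega⟩
      have hmod : PySem.Int.mod a 2 = a % 2 := PySem.Int.mod_eq_emod_of_pos (by norm_num)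
      have hdivc : PySem.Int.floordiv (a + 1) 2 = (a + 1) / 2 :=
        PySem.Int.floordiv_eq_ediv_of_pos (by norm_num)
      have hdiv : PySem.Int.floordiv a 2 = a / 2 :=
        PySem.Int.floordiv_eq_ediv_of_pos (by norm_num)
      have hmod1 : PySem.Int.mod (a + 1) 2 = (a + 1) % 2 :=
        PySem.Int.mod_eq_emod_of_pos (by norm_num)
      rw [show b * 2 ^ (k + 1) = 2 * (b * 2 ^ k) from by ring] at hle
      obtain ⟨B, hB⟩ : ∃ B, b * 2 ^ k = B := ⟨_, rfl⟩
      rw [hB] at hle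
      have hab' : a ≠ b := by omega
      have hba : ¬ b > a := by omega
      have hL : transformCeilLoop (n' + 1) count a b
          = transformCeilLoop n' (count + (1 + PySem.Int.mod a 2)) (PySem.Int.floordiv (a + 1) 2) b := by
        simp only [transformCeilLoop]; rw [if_pos hgt]
      by_cases hodd : a % 2 = 1
      · -- odd: A takes two steps (increment, then the forced halve); B one ceil step of cost 2
        have hstep1 : a + 1 ≠ b := by omega
        have hstep2 : ¬ b > a + 1 := by omega
        have hA1 : transformFuel (m' + 1 + 1) a b = 1 + transformFuel (m' + 1) (a + 1) b := by
          simp only [transformFuel]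
          rw [if_neg hab', if_neg hba, if_pos (by rw [hmod]; exact hodd)]
        have hA2 : transformFuel (m' + 1) (a + 1) b
            = 1 + transformFuel m' (PySem.Int.floordiv (a + 1) 2) b := by
          simp only [transformFuel]
          rw [if_neg hstep1, if_neg hstep2, if_neg (by rw [hmod1]; omega)]
        have hbnd : (a + 1) / 2 ≤ b * 2 ^ k := by rw [hB]; omega
        show transformCeilLoop (n' + 1) count a b = count + transformFuel (m' + 1 + 1) a b
        rw [hL, hmod, hodd, hdivc,
          ih ((a + 1) / 2) b (count + (1 + 1)) n' m' hb hbnd (by omega) (by omega),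
          hA1, hA2, hdivc]
        ring
      · -- even: A one step; B one ceil step of cost 1, where (a+1)/2 = a/2
        have hev : a % 2 = 0 := by omega
        have hsame : (a + 1) / 2 = a / 2 := by omega
        have hA1 : transformFuel (m' + 1 + 1) a b
            = 1 + transformFuel (m' + 1) (PySem.Int.floordiv a 2) b := by
          simp only [transformFuel]
          rw [if_neg hab', if_neg hba, if_neg (by rw [hmod]; omega)]
        have hbnd : PySem.Int.floordiv a 2 ≤ b * 2 ^ k := by rw [hdiv, hB]; omega
        show transformCeilLoop (n' + 1) count a b = count + transformFuel (m' + 1 + 1) a b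
        rw [hL, hmod, hev, hdivc, hsame, ← hdiv,
          ih (PySem.Int.floordiv a 2) b (count + (1 + 0)) n' (m' + 1) hb hbnd (by omega) (by omega),
          hA1]
        ring

-- ===== VERDICT (by name: the statement is the Claim_ definition above) =====
theorem transform_spec : Claim_equal_transform := by
  intro a b hdom hpre
  unfold Spec_transform transform transform_alt
  by_cases hab : a ≤ b
  · have h := base_eq 0 a b 99 199 hab
    norm_num at h
    omega
  · have hb : 1 ≤ b := by rcases hpre with h | h; omega; exact h
    have hA : a ≤ 2147483648 := by
      have := hdom; unfold Dom_transform pvDomInt at this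
      simp only [Bool.and_eq_true, decide_eq_true_eq] at this; omega
    have hpow : (2147483648 : Int) ≤ b * 2 ^ 31 := by
      have : (2 : Int) ^ 31 = 2147483648 := by norm_num
      nlinarith
    have h := ceil_eq 31 a b 0 100 200 hb (by omega) (by omega) (by omega)
    omega
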